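-- pv_equiv track=rewrite | github.com/yashanand1910/solutions | algomonster/dynamic-programming/plumber.py | plumber
-- ===== SOURCE A (Python) =====
-- from typing import List
--
-- def plumber(grid: List[List[int]]) -> int:
--     n = len(grid)
--     m = len(grid[0])
--     dp = [[-1 for _ in range(m)] for _ in range(n)]
--
--     # work on first row
--     i = 0
--     while i < m:
--         coins = 0
--         last_start = i
--         while i < m and grid[0][i] != -1:
--             coins += grid[0][i]
--             i += 1
--         for j in range(last_start, i):
--             dp[0][j] = coins
--         i += 1
--
--     for r in range(1, n):
--         max_row = -1
--         i = 0
--         while i < m: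
--             last_start = i
--             coins = 0
--             max_upper = -1
--             while i < m and grid[r][i] != -1:
--                 coins += grid[r][i]
--                 max_upper = max(max_upper, dp[r - 1][i])
--                 i += 1
--             if max_upper != -1:
--                 max_row = max(max_row, coins + max_upper)
--                 for j in range(last_start, i):
--                     dp[r][j] = coins + max_upper
--             while i < m and grid[r][i] == -1:
--                 i += 1
--         if r == n - 1:
--             return max_row
-- ===== SOURCE B (Python) =====
-- from typing import List
--
-- def plumber(grid: List[List[int]]) -> int:
--     n = len(grid)
--     m = len(grid[0])
--
--     def sweep(row, prev):
--         # forward sweep: running run-sum / running max of prev, reset at -1 walls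
--         fwd = []
--         s, u = 0, -1
--         for j in range(m):
--             if row[j] == -1:
--                 s, u = 0, -1
--             else:
--                 s += row[j]
--                 if prev is not None:
--                     u = max(u, prev[j])
--             fwd.append((s, u))
--         # backward sweep: broadcast each run's final pair to all of its cells
--         cur = []
--         best = -1
--         ok, val = False, 0
--         for j in range(m - 1, -1, -1):
--             if row[j] == -1:
--                 cur.append(-1)
--             else:
--                 if j == m - 1 or row[j + 1] == -1:  # rightmost cell of its run
--                     s, u = fwd[j]
--                     ok = prev is None or u != -1
--                     val = s if prev is None else s + u
--                     if ok and prev is not None: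
--                         best = max(best, val)
--                 cur.append(val if ok else -1)
--         cur.reverse()
--         return cur, best
--
--     prev, _ = sweep(grid[0], None)
--     ans = None
--     for r in range(1, n):
--         prev, ans = sweep(grid[r], prev)
--     return ans
-- ===== Notes on version B (the rewrite author's own statement) =====
-- stated objective: alternative
-- what changed: B drops A's n×m dp table and per-segment nested while-loops entirely: each row is handled by two linear index sweeps with reset-at-wall accumulators — a forward sweep carrying a running run-sum and running max of the previous 1-D row, and a backward sweep that broadcasts each run's final pair to all of its cells while collecting the row maximum.
-- outside the precondition, e.g. on plumber([[1, 2]]): A returns None, B returns None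
import Mathlib
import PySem

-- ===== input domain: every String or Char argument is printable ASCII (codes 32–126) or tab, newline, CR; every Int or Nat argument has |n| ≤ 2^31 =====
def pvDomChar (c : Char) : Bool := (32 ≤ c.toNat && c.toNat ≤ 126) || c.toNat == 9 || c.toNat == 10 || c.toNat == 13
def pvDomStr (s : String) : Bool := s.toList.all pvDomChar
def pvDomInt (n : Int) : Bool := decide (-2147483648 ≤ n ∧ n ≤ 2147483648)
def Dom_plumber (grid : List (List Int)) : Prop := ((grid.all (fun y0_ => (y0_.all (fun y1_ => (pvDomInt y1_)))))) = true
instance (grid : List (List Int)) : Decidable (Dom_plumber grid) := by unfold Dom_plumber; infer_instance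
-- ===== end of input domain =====

-- B drops A's n×m dp table and per-segment nested while-loops: each row is handled by two
-- linear sweeps with reset-at-wall accumulators (a forward sweep carrying a running run-sum and
-- running max of the previous 1-D row, then a backward sweep broadcasting each run's final pair
-- to its cells while collecting the row maximum). Same O(n·m) cost, different decomposition.
-- Equivalence is proved on grids with ≥ 2 rows whose rows are at least as long as row 0
-- (elsewhere A raises IndexError or returns None).
-- A's while-loops are ported with a fuel argument (m+1 always suffices: the index grows each
-- pass); fuel exhaustion is unreachable, it only makes the recursion structural.

-- ===== PORT A =====
-- 'for j in range(s, e): dp[r][j] = v'  (the two fill loops of A)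
def pvFill2 (dp : List (List Int)) (r s e : Nat) (v : Int) : List (List Int) :=
  (List.range' s (e - s)).foldl (fun dp j => dp.modify r (fun row => row.set j v)) dp

-- inner 'while i < m and grid[0][i] != -1: coins += grid[0][i]; i += 1'
def pvScan1 (row : List Int) (m : Nat) : Nat → Nat → Int → Int × Nat
  | 0, i, coins => (coins, i)
  | fuel+1, i, coins =>
    if i < m then
      if row.getD i 0 ≠ -1 then pvScan1 row m fuel (i+1) (coins + row.getD i 0)
      else (coins, i)
    else (coins, i)

-- first-row 'while i < m' loop
def pvRow0 (row : List Int) (m : Nat) : Nat → List (List Int) → Nat → List (List Int)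
  | 0, dp, _ => dp
  | fuel+1, dp, i =>
    if i < m then
      pvRow0 row m fuel
        (pvFill2 dp 0 i (pvScan1 row m (m+1) i 0).2 (pvScan1 row m (m+1) i 0).1)
        ((pvScan1 row m (m+1) i 0).2 + 1)
    else dp

-- inner 'while i < m and grid[r][i] != -1: coins += …; max_upper = max(max_upper, dp[r-1][i]); i += 1'
def pvScan2 (row : List Int) (dp : List (List Int)) (r m : Nat) :
    Nat → Nat → Int → Int → Int × Int × Nat
  | 0, i, coins, mu => (coins, mu, i)
  | fuel+1, i, coins, mu =>
    if i < m then
      if row.getD i 0 ≠ -1 then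
        pvScan2 row dp r m fuel (i+1) (coins + row.getD i 0)
          (max mu ((dp.getD (r-1) []).getD i 0))
      else (coins, mu, i)
    else (coins, mu, i)

-- trailing 'while i < m and grid[r][i] == -1: i += 1'
def pvSkip (row : List Int) (m : Nat) : Nat → Nat → Nat
  | 0, i => i
  | fuel+1, i => if i < m then (if row.getD i 0 = -1 then pvSkip row m fuel (i+1) else i) else i

-- 'while i < m' loop of one later row r (returns (max_row, dp))
def pvRowLoop (row : List Int) (r m : Nat) :
    Nat → List (List Int) → Nat → Int → Int × List (List Int)
  | 0, dp, _, maxRow => (maxRow, dp)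
  | fuel+1, dp, i, maxRow =>
    if i < m then
      pvRowLoop row r m fuel
        (if (pvScan2 row dp r m (m+1) i 0 (-1)).2.1 ≠ -1 then
          pvFill2 dp r i (pvScan2 row dp r m (m+1) i 0 (-1)).2.2
            ((pvScan2 row dp r m (m+1) i 0 (-1)).1 + (pvScan2 row dp r m (m+1) i 0 (-1)).2.1)
        else dp)
        (pvSkip row m (m+1) (pvScan2 row dp r m (m+1) i 0 (-1)).2.2)
        (if (pvScan2 row dp r m (m+1) i 0 (-1)).2.1 ≠ -1 then
          max maxRow ((pvScan2 row dp r m (m+1) i 0 (-1)).1 + (pvScan2 row dp r m (m+1) i 0 (-1)).2.1)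
        else maxRow)
    else (maxRow, dp)

-- 'for r in range(1, n)' with the early 'return max_row' at r == n-1
def pvOuter (grid : List (List Int)) (m n : Nat) : List Nat → List (List Int) → Int
  | [], _ => 0  -- Python falls through and returns None here (n ≤ 1, excluded by Pre_)
  | r :: rs, dp =>
    if r = n - 1 then (pvRowLoop (grid.getD r []) r m (m+1) dp 0 (-1)).1
    else pvOuter grid m n rs (pvRowLoop (grid.getD r []) r m (m+1) dp 0 (-1)).2

def plumber (grid : List (List Int)) : Int :=
  pvOuter grid (grid.getD 0 []).length grid.length
    (List.range' 1 (grid.length - 1))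
    (pvRow0 (grid.getD 0 []) (grid.getD 0 []).length ((grid.getD 0 []).length + 1)
      (List.replicate grid.length (List.replicate (grid.getD 0 []).length (-1))) 0)

-- ===== PORT B =====
-- forward sweep: 'for j in range(m)' building fwd, carrying (s, u) reset at -1 walls
def sweepFwd (row : List Int) (prev : Option (List Int)) (m : Nat) :
    List (Int × Int) × Int × Int :=
  (List.range m).foldl
    (fun (st : List (Int × Int) × Int × Int) j =>
      if row.getD j 0 = -1 then (st.1 ++ [((0 : Int), (-1 : Int))], 0, -1)
      else
        let s := st.2.1 + row.getD j 0
        let u := if prev = none then st.2.2 else max st.2.2 ((prev.getD []).getD j 0)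
        (st.1 ++ [(s, u)], s, u))
    ([], 0, -1)

-- backward sweep: 'for j in range(m-1, -1, -1)' building cur (appended, reversed at the end),
-- state (cur, best, ok, val); at a run's rightmost cell (ok, val, best) are refreshed from fwd
def sweepBack (row : List Int) (prev : Option (List Int)) (fwd : List (Int × Int)) (m : Nat) :
    List Int × Int × Bool × Int :=
  ((List.range m).reverse).foldl
    (fun (st : List Int × Int × Bool × Int) j =>
      if row.getD j 0 = -1 then (st.1 ++ [(-1 : Int)], st.2)
      else
        let st2 :=
          if j = m - 1 ∨ row.getD (j+1) 0 = -1 then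
            let su := fwd.getD j (0, -1)
            let ok := decide (prev = none) || decide (su.2 ≠ -1)
            let val := if prev = none then su.1 else su.1 + su.2
            ((if ok && !decide (prev = none) then max st.2.1 val else st.2.1), ok, val)
          else st.2
        (st.1 ++ [if st2.2.1 then st2.2.2 else -1], st2))
    ([], -1, false, 0)

def sweep (row : List Int) (prev : Option (List Int)) (m : Nat) : List Int × Int :=
  ((sweepBack row prev (sweepFwd row prev m).1 m).1.reverse,
   (sweepBack row prev (sweepFwd row prev m).1 m).2.1)

def plumber_alt (grid : List (List Int)) : Int :=
  ((List.range' 1 (grid.length - 1)).foldl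
    (fun (st : List Int × Int) r =>
      sweep (grid.getD r []) (some st.1) (grid.getD 0 []).length)
    ((sweep (grid.getD 0 []) none (grid.getD 0 []).length).1, 0)).2

-- ===== PRECONDITION & SPEC =====
-- Pre_ excludes grids with fewer than 2 rows (A falls through and returns None, not an int)
-- and grids in which some row is shorter than row 0 (A raises IndexError there).
def Pre_plumber (grid : List (List Int)) : Prop :=
  2 ≤ grid.length ∧ ∀ row ∈ grid, (grid.getD 0 []).length ≤ row.length

instance (grid : List (List Int)) : Decidable (Pre_plumber grid) := by
  unfold Pre_plumber; infer_instance

def pvWitness_plumber : List (List Int) := [[1, 2], [3, -1]]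

def Spec_plumber (grid : List (List Int)) (out : Int) : Prop := out = plumber_alt grid
instance (grid : List (List Int)) (out : Int) : Decidable (Spec_plumber grid out) := by
  unfold Spec_plumber; infer_instance

-- ===== CLAIM (what is proved, stated in full; the proofs are below) =====
def Claim_equal_plumber : Prop :=
  ∀ (grid : List (List Int)), Dom_plumber grid → Pre_plumber grid →
    Spec_plumber grid (plumber grid)

-- ===== LEMMAS AND PROOFS =====

theorem getD_lt {α : Type} (l : List α) (i : Nat) (d : α) (h : i < l.length) :
    l.getD i d = l[i] := by
  simp [List.getD_eq_getElem?_getD, List.getElem?_eq_getElem h]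

theorem getD_set_self (dp : List (List Int)) (r : Nat) (x : List Int)
    (h : r < dp.length) : (dp.set r x).getD r [] = x := by
  rw [getD_lt _ _ _ (by simpa using h)]
  simp [h]

theorem getD_set_ne (dp : List (List Int)) (r r' : Nat) (x : List Int)
    (h : r' ≠ r) : (dp.set r x).getD r' [] = dp.getD r' [] := by
  simp [List.getD_eq_getElem?_getD, List.getElem?_set_ne (by omega : r ≠ r')]

theorem set_getD_self (dp : List (List Int)) (r : Nat) (h : r < dp.length) :
    dp.set r (dp.getD r []) = dp := by
  rw [getD_lt _ _ _ h]
  exact List.set_getElem_self h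

theorem modify_eq_set (l : List (List Int)) (r : Nat) (f : List Int → List Int)
    (h : r < l.length) : l.modify r f = l.set r (f (l.getD r [])) := by
  induction l generalizing r with
  | nil => simp at h
  | cons x xs ih =>
    cases r with
    | zero => simp [List.modify, List.getD]
    | succ r => simp_all [List.modify, List.getD]

theorem getD_replicate {α : Type} (n i : Nat) (x d : α) (h : i < n) :
    (List.replicate n x).getD i d = x := by
  rw [getD_lt _ _ _ (by simpa using h)]
  simp

theorem take_append_ge {α : Type} (l1 l2 : List α) (n : Nat) (h : l1.length ≤ n) :
    (l1 ++ l2).take n = l1 ++ l2.take (n - l1.length) := by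
  rw [List.take_append, List.take_of_length_le h]

theorem drop_append_ge {α : Type} (l1 l2 : List α) (n : Nat) (h : l1.length ≤ n) :
    (l1 ++ l2).drop n = l2.drop (n - l1.length) := by
  rw [List.drop_append, List.drop_eq_nil_of_le (by simpa using h)]
  simp

-- 'for j in range(s, e): xs[j] = v' on a 1-D row (named form of the fill folds)
def altFill (xs : List Int) (s e : Nat) (v : Int) : List Int :=
  (List.range' s (e - s)).foldl (fun xs j => xs.set j v) xs

theorem altFill_length (xs : List Int) (s e : Nat) (v : Int) :
    (altFill xs s e v).length = xs.length := by
  rw [altFill]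
  generalize List.range' s (e - s) = l
  induction l generalizing xs with
  | nil => simp
  | cons j l ih => rw [List.foldl_cons, ih]; simp

theorem pvFill2_eq_set (dp : List (List Int)) (r s e : Nat) (v : Int)
    (h : r < dp.length) :
    pvFill2 dp r s e v = dp.set r (altFill (dp.getD r []) s e v) := by
  rw [pvFill2, altFill]
  generalize List.range' s (e - s) = l
  induction l generalizing dp with
  | nil => simp; exact (set_getD_self dp r h).symm
  | cons j l ih =>
    rw [List.foldl_cons, List.foldl_cons]
    rw [modify_eq_set dp r _ h]
    rw [ih _ (by simpa using h)]
    rw [getD_set_self dp r _ h, List.set_set]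

theorem altFill_spec (l : List Int) (i e : Nat) (v : Int) (hie : i ≤ e)
    (he : e ≤ l.length) :
    altFill l i e v = l.take i ++ List.replicate (e - i) v ++ l.drop e := by
  rw [altFill]
  obtain ⟨k, hk⟩ : ∃ k, e - i = k := ⟨e - i, rfl⟩
  rw [hk]
  induction k generalizing i l with
  | zero =>
    have : e = i := by omega
    subst this
    simp
  | succ k ih =>
    have hi : i < l.length := by omega
    rw [List.range'_succ, List.foldl_cons]
    rw [ih (l.set i v) (i+1) (by omega) (by simpa using he) (by omega)]
    rw [List.set_eq_take_cons_drop v hi]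
    have hlt : (l.take i).length = i := by simp; omega
    have h1 : (l.take i ++ v :: l.drop (i+1)).take (i+1)
        = l.take i ++ [v] := by
      rw [take_append_ge _ _ _ (by omega)]
      rw [hlt]
      have : i + 1 - i = 1 := by omega
      rw [this]
      simp
    have h2 : (l.take i ++ v :: l.drop (i+1)).drop e
        = l.drop e := by
      rw [drop_append_ge _ _ _ (by omega), hlt]
      have h3 : e - i = (e - (i+1)) + 1 := by omega
      rw [h3, List.drop_succ_cons, List.drop_drop]
      congr 1
      omega
    rw [h1, h2]
    have : List.replicate (k+1) v = [v] ++ List.replicate k v := by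
      simp [List.replicate_succ]
    rw [this]
    simp

theorem setFold_getD_notmem (v : Int) (t : Nat) :
    ∀ (L : List Nat) (l : List Int), (∀ j ∈ L, j ≠ t) →
      (L.foldl (fun xs j => xs.set j v) l).getD t 0 = l.getD t 0 := by
  intro L
  induction L with
  | nil => intro l h; simp
  | cons j L ih =>
    intro l h
    rw [List.foldl_cons]
    rw [ih (l.set j v) (fun x hx => h x (by simp [hx]))]
    simp [List.getD_eq_getElem?_getD, List.getElem?_set_ne (h j (by simp))]

theorem altFill_getD_ge (l : List Int) (i e t : Nat) (v : Int) (h : e ≤ t) :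
    (altFill l i e v).getD t 0 = l.getD t 0 := by
  rw [altFill]
  apply setFold_getD_notmem
  intro j hj
  rw [List.mem_range'] at hj
  omega

-- ---- pvEnd: first index ≥ i that is m or holds -1 (where both of A's inner scans stop) ----
def pvEnd (row : List Int) (m i : Nat) : Nat :=
  if _h : i < m then (if row.getD i 0 ≠ -1 then pvEnd row m (i+1) else i) else i
termination_by m - i

theorem pvEnd_ge (row : List Int) (m i : Nat) : i ≤ pvEnd row m i := by
  fun_induction pvEnd <;> omega

theorem pvEnd_le (row : List Int) (m i : Nat) (h : i ≤ m) : pvEnd row m i ≤ m := by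
  fun_induction pvEnd <;> omega

theorem pvEnd_stop (row : List Int) (m i : Nat) (h : pvEnd row m i < m) :
    row.getD (pvEnd row m i) 0 = -1 := by
  fun_induction pvEnd <;> simp_all

theorem pvEnd_gt (row : List Int) (m i : Nat) (hi : i < m)
    (hw : row.getD i 0 ≠ -1) : i < pvEnd row m i := by
  rw [pvEnd, dif_pos hi, if_pos hw]
  have := pvEnd_ge row m (i+1)
  omega

theorem pvEnd_nonwall (row : List Int) (m i : Nat) :
    ∀ t, i ≤ t → t < pvEnd row m i → row.getD t 0 ≠ -1 := by
  fun_induction pvEnd with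
  | case1 i hi hw ih =>
    intro t h1 h2
    rcases Nat.eq_or_lt_of_le h1 with h | h
    · subst h; exact hw
    · exact ih t h h2
  | case2 i hi hw => intro t h1 h2; omega
  | case3 i hi => intro t h1 h2; omega

-- ---- scan characterizations (A's inner while loops) ----
-- sum(row[a:e]) and max([-1] + prev[a:e]) as drop/take folds
def sSum (row : List Int) (a e : Nat) : Int :=
  ((row.drop a).take (e - a)).foldl (· + ·) 0

def sMax (p : List Int) (a e : Nat) : Int :=
  ((p.drop a).take (e - a)).foldl max (-1)

def pMax (prev : Option (List Int)) (a e : Nat) : Int :=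
  match prev with
  | none => -1
  | some p => sMax p a e

theorem pvScan1_eq (row : List Int) (m : Nat) (hm : m ≤ row.length) :
    ∀ (fuel i : Nat) (c : Int), m - i < fuel → pvScan1 row m fuel i c =
      (((row.drop i).take (pvEnd row m i - i)).foldl (· + ·) c, pvEnd row m i) := by
  intro fuel
  induction fuel with
  | zero => intro i c h; omega
  | succ fuel ih =>
    intro i c h
    rw [pvScan1]
    by_cases hi : i < m
    · rw [if_pos hi]
      by_cases hne : row.getD i 0 = -1
      · rw [if_neg (not_not_intro hne)]
        have he : pvEnd row m i = i := by
          rw [pvEnd, dif_pos hi, if_neg (not_not_intro hne)]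
        rw [he]
        simp
      · rw [if_pos hne]
        rw [ih (i+1) _ (by omega)]
        have he : pvEnd row m i = pvEnd row m (i+1) := by
          rw [pvEnd, dif_pos hi, if_pos hne]
        have hge := pvEnd_ge row m (i+1)
        have hil : i < row.length := by omega
        rw [← he]
        rw [List.drop_eq_getElem_cons hil]
        have hs : pvEnd row m i - i = (pvEnd row m i - (i+1)) + 1 := by omega
        rw [hs, List.take_succ_cons]
        rw [getD_lt _ _ _ hil]
        simp
    · rw [if_neg hi]
      have he : pvEnd row m i = i := by rw [pvEnd, dif_neg hi]
      rw [he]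
      simp

theorem pvScan2_eq (row : List Int) (dp : List (List Int)) (r m : Nat)
    (hm : m ≤ row.length) (hp : m ≤ (dp.getD (r-1) []).length) :
    ∀ (fuel i : Nat) (c u : Int), m - i < fuel → pvScan2 row dp r m fuel i c u =
      (((row.drop i).take (pvEnd row m i - i)).foldl (· + ·) c,
       (((dp.getD (r-1) []).drop i).take (pvEnd row m i - i)).foldl max u,
       pvEnd row m i) := by
  intro fuel
  induction fuel with
  | zero => intro i c u h; omega
  | succ fuel ih =>
    intro i c u h
    rw [pvScan2]
    by_cases hi : i < m
    · rw [if_pos hi]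
      by_cases hne : row.getD i 0 = -1
      · rw [if_neg (not_not_intro hne)]
        have he : pvEnd row m i = i := by
          rw [pvEnd, dif_pos hi, if_neg (not_not_intro hne)]
        rw [he]
        simp
      · rw [if_pos hne]
        rw [ih (i+1) _ _ (by omega)]
        have he : pvEnd row m i = pvEnd row m (i+1) := by
          rw [pvEnd, dif_pos hi, if_pos hne]
        have hge := pvEnd_ge row m (i+1)
        have hil : i < row.length := by omega
        have hip : i < (dp.getD (r-1) []).length := by omega
        rw [← he]
        rw [List.drop_eq_getElem_cons hil, List.drop_eq_getElem_cons hip]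
        have hs : pvEnd row m i - i = (pvEnd row m i - (i+1)) + 1 := by omega
        rw [hs, List.take_succ_cons, List.take_succ_cons]
        rw [getD_lt _ _ _ hil, getD_lt _ _ _ hip]
        simp
    · rw [if_neg hi]
      have he : pvEnd row m i = i := by rw [pvEnd, dif_neg hi]
      rw [he]
      simp

theorem pvSkip_ge (row : List Int) (m : Nat) :
    ∀ (fuel i : Nat), i ≤ pvSkip row m fuel i := by
  intro fuel
  induction fuel with
  | zero => intro i; rw [pvSkip]
  | succ fuel ih =>
    intro i
    rw [pvSkip]
    by_cases hi : i < m
    · rw [if_pos hi]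
      by_cases hneg : row.getD i 0 = -1
      · rw [if_pos hneg]
        have := ih (i+1)
        omega
      · rw [if_neg hneg]
    · rw [if_neg hi]

theorem pvSkip_le (row : List Int) (m : Nat) :
    ∀ (fuel i : Nat), i ≤ m → pvSkip row m fuel i ≤ m := by
  intro fuel
  induction fuel with
  | zero => intro i h; rw [pvSkip]; exact h
  | succ fuel ih =>
    intro i h
    rw [pvSkip]
    by_cases hi : i < m
    · rw [if_pos hi]
      by_cases hneg : row.getD i 0 = -1
      · rw [if_pos hneg]; exact ih (i+1) (by omega)
      · rw [if_neg hneg]; exact h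
    · rw [if_neg hi]; exact h

theorem pvSkip_wall (row : List Int) (m : Nat) :
    ∀ (fuel i t : Nat), i ≤ t → t < pvSkip row m fuel i → row.getD t 0 = -1 := by
  intro fuel
  induction fuel with
  | zero => intro i t h1 h2; rw [pvSkip] at h2; omega
  | succ fuel ih =>
    intro i t h1 h2
    rw [pvSkip] at h2
    by_cases hi : i < m
    · rw [if_pos hi] at h2
      by_cases hneg : row.getD i 0 = -1
      · rw [if_pos hneg] at h2
        rcases Nat.eq_or_lt_of_le h1 with h | h
        · subst h; exact hneg
        · exact ih (i+1) t h h2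
      · rw [if_neg hneg] at h2; omega
    · rw [if_neg hi] at h2; omega

theorem pvStep_gt (row : List Int) (dp : List (List Int)) (r m i : Nat)
    (hm : m ≤ row.length) (hp : m ≤ (dp.getD (r-1) []).length) (h : i < m) :
    i < pvSkip row m (m+1) (pvScan2 row dp r m (m+1) i 0 (-1)).2.2 := by
  rw [pvScan2_eq row dp r m hm hp (m+1) i 0 (-1) (by omega)]
  dsimp only
  have hge := pvEnd_ge row m i
  have hle := pvEnd_le row m i (by omega)
  by_cases he : pvEnd row m i < m
  · have hstop := pvEnd_stop row m i he
    rw [pvSkip, if_pos he, if_pos hstop]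
    have := pvSkip_ge row m m (pvEnd row m i + 1)
    omega
  · have hem : pvEnd row m i = m := by omega
    rw [hem, pvSkip, if_neg (by omega : ¬ m < m)]
    omega

-- ---- the per-run specification both implementations are proved to compute ----
-- start of the run containing j (leftmost a ≤ j with a = 0 or a wall at a-1)
def segStart (row : List Int) : Nat → Nat
  | 0 => 0
  | j+1 => if row.getD j 0 = -1 then j+1 else segStart row j

theorem segStart_le (row : List Int) (j : Nat) : segStart row j ≤ j := by
  induction j with
  | zero => simp [segStart]
  | succ j ih =>
    rw [segStart]
    split
    · omega
    · omega

-- whether a run's cells get a value, and which value (ok/val of B, A's max_upper test)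
def runOk (row : List Int) (prev : Option (List Int)) (m i : Nat) : Bool :=
  decide (prev = none) || decide (pMax prev i (pvEnd row m i) ≠ -1)

def runVal (row : List Int) (prev : Option (List Int)) (m i : Nat) : Int :=
  if prev = none then sSum row i (pvEnd row m i)
  else sSum row i (pvEnd row m i) + pMax prev i (pvEnd row m i)

-- the finished dp row from column i on
def specFrom (row : List Int) (prev : Option (List Int)) (m i : Nat) : List Int :=
  if h : i < m then
    if hw : row.getD i 0 = -1 then (-1 : Int) :: specFrom row prev m (i+1)
    else
      List.replicate (pvEnd row m i - i)
          (if runOk row prev m i then runVal row prev m i else -1)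
        ++ specFrom row prev m (pvEnd row m i)
  else []
termination_by m - i
decreasing_by
  · omega
  · have := pvEnd_gt row m i h hw
    have := pvEnd_le row m i (by omega)
    omega

-- the row maximum from column i on
def specBest (row : List Int) (prev : Option (List Int)) (m i : Nat) : Int :=
  if h : i < m then
    if hw : row.getD i 0 = -1 then specBest row prev m (i+1)
    else
      if runOk row prev m i && !decide (prev = none) then
        max (runVal row prev m i) (specBest row prev m (pvEnd row m i))
      else specBest row prev m (pvEnd row m i)
  else -1
termination_by m - i
decreasing_by
  · omega
  · have := pvEnd_gt row m i h hw
    have := pvEnd_le row m i (by omega)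
    omega
  · have := pvEnd_gt row m i h hw
    have := pvEnd_le row m i (by omega)
    omega

theorem specBest_ge (row : List Int) (prev : Option (List Int)) (m i : Nat) :
    -1 ≤ specBest row prev m i := by
  fun_induction specBest with
  | case1 i h hw ih => exact ih
  | case2 i h hw hc ih =>
    calc (-1 : Int) ≤ specBest row prev m (pvEnd row m i) := ih
      _ ≤ _ := le_max_right _ _
  | case3 i h hw hc ih => exact ih
  | case4 i h => omega

theorem specFrom_wall (row : List Int) (prev : Option (List Int)) (m i : Nat)
    (him : i < m) (hw : row.getD i 0 = -1) :
    specFrom row prev m i = (-1 : Int) :: specFrom row prev m (i+1) := by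
  conv_lhs => rw [specFrom]
  rw [dif_pos him, dif_pos hw]

theorem specFrom_run (row : List Int) (prev : Option (List Int)) (m i : Nat)
    (him : i < m) (hw : ¬ row.getD i 0 = -1) :
    specFrom row prev m i
      = List.replicate (pvEnd row m i - i)
          (if runOk row prev m i then runVal row prev m i else -1)
        ++ specFrom row prev m (pvEnd row m i) := by
  conv_lhs => rw [specFrom]
  rw [dif_pos him, dif_neg hw]

theorem specBest_wall (row : List Int) (prev : Option (List Int)) (m i : Nat)
    (him : i < m) (hw : row.getD i 0 = -1) :
    specBest row prev m i = specBest row prev m (i+1) := by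
  conv_lhs => rw [specBest]
  rw [dif_pos him, dif_pos hw]

theorem specBest_run (row : List Int) (prev : Option (List Int)) (m i : Nat)
    (him : i < m) (hw : ¬ row.getD i 0 = -1) :
    specBest row prev m i
      = if runOk row prev m i && !decide (prev = none) then
          max (runVal row prev m i) (specBest row prev m (pvEnd row m i))
        else specBest row prev m (pvEnd row m i) := by
  conv_lhs => rw [specBest]
  rw [dif_pos him, dif_neg hw]

theorem specFrom_length (row : List Int) (prev : Option (List Int)) (m i : Nat) :
    (specFrom row prev m i).length = m - i := by
  fun_induction specFrom with
  | case1 i h hw ih => simp [ih]; omega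
  | case2 i h hw ih =>
    have h1 := pvEnd_gt row m i h hw
    have h2 := pvEnd_le row m i (by omega)
    simp [ih]
    omega
  | case3 i h => simp; omega

theorem specFrom_skip (row : List Int) (prev : Option (List Int)) (m : Nat) :
    ∀ (fuel i : Nat),
      specFrom row prev m i
        = List.replicate (pvSkip row m fuel i - i) (-1)
            ++ specFrom row prev m (pvSkip row m fuel i) := by
  intro fuel
  induction fuel with
  | zero => intro i; rw [pvSkip]; simp
  | succ fuel ih =>
    intro i
    rw [pvSkip]
    by_cases hi : i < m
    · rw [if_pos hi]
      by_cases hneg : row.getD i 0 = -1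
      · rw [if_pos hneg]
        conv_lhs => rw [specFrom]
        rw [dif_pos hi, dif_pos hneg, ih (i+1)]
        have := pvSkip_ge row m fuel (i+1)
        have hs : pvSkip row m fuel (i+1) - i = (pvSkip row m fuel (i+1) - (i+1)) + 1 := by
          omega
        rw [hs, List.replicate_succ]
        simp
      · rw [if_neg hneg]; simp
    · rw [if_neg hi]; simp

theorem specBest_skip (row : List Int) (prev : Option (List Int)) (m : Nat) :
    ∀ (fuel i : Nat), specBest row prev m (pvSkip row m fuel i) = specBest row prev m i := by
  intro fuel
  induction fuel with
  | zero => intro i; rw [pvSkip]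
  | succ fuel ih =>
    intro i
    rw [pvSkip]
    by_cases hi : i < m
    · rw [if_pos hi]
      by_cases hneg : row.getD i 0 = -1
      · rw [if_pos hneg, ih (i+1)]
        conv_rhs => rw [specBest]
        rw [dif_pos hi, dif_pos hneg]
      · rw [if_neg hneg]
    · rw [if_neg hi]

-- getD-fresh segments of a row are replicate (-1)
theorem drop_take_rep (l : List Int) (e i' : Nat) (hle : e ≤ i') (hl : i' ≤ l.length)
    (hfresh : ∀ t, e ≤ t → t < i' → l.getD t 0 = -1) :
    (l.drop e).take (i' - e) = List.replicate (i' - e) (-1) := by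
  obtain ⟨k, hk⟩ : ∃ k, i' - e = k := ⟨i' - e, rfl⟩
  rw [hk]
  induction k generalizing i' with
  | zero => simp
  | succ k ih =>
    have h1 : i' - 1 - e = k := by omega
    rw [show k + 1 = k + 1 from rfl]
    rw [List.take_succ]
    rw [ih (i' - 1) (by omega) (by omega)
      (fun t ht1 ht2 => hfresh t ht1 (by omega)) h1]
    have hlt : e + k < l.length := by omega
    have : (l.drop e)[k]? = some l[e + k] := by
      rw [List.getElem?_drop]
      exact List.getElem?_eq_getElem hlt
    rw [this]
    have : l[e + k] = -1 := by
      rw [← getD_lt l (e+k) 0 hlt]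
      exact hfresh (e+k) (by omega) (by omega)
    rw [this]
    have : List.replicate (k+1) (-1 : Int) = List.replicate k (-1) ++ [-1] := by
      rw [← List.replicate_succ']
    rw [this]
    simp

theorem take_extend (l : List Int) (i i' : Nat) (hle : i ≤ i') (hl : i' ≤ l.length)
    (hfresh : ∀ t, i ≤ t → t < i' → l.getD t 0 = -1) :
    l.take i' = l.take i ++ List.replicate (i' - i) (-1) := by
  have h1 : i' = i + (i' - i) := by omega
  conv_lhs => rw [h1]
  rw [List.take_add]
  rw [drop_take_rep l i i' hle hl hfresh]

-- ---- A-side: row 0 ----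
theorem pvRow0_spec (row : List Int) (m : Nat) (hm : m ≤ row.length) :
    ∀ (fuel i : Nat) (dp : List (List Int)), m - i < fuel → 0 < dp.length →
      (dp.getD 0 []).length = m →
      (∀ t, i ≤ t → t < m → (dp.getD 0 []).getD t 0 = -1) →
      pvRow0 row m fuel dp i
        = dp.set 0 ((dp.getD 0 []).take i ++ specFrom row none m i) := by
  intro fuel
  induction fuel with
  | zero => intro i dp hfu h0 hlen hfresh; omega
  | succ fuel ih =>
    intro i dp hfu h0 hlen hfresh
    rw [pvRow0]
    by_cases hi : i < m
    · rw [if_pos hi]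
      rw [pvScan1_eq row m hm (m+1) i 0 (by omega)]
      dsimp only
      set e := pvEnd row m i with he
      have hee := pvEnd_ge row m i
      have hel := pvEnd_le row m i (by omega)
      rw [pvFill2_eq_set dp 0 i e _ h0]
      set v : Int := ((row.drop i).take (e - i)).foldl (· + ·) 0 with hv
      set dprow := dp.getD 0 [] with hdprow
      have hfl : (altFill dprow i e v).length = m := by rw [altFill_length, hlen]
      rw [ih (e+1) _ (by omega) (by simpa using h0)
        (by rw [getD_set_self dp 0 _ h0]; exact hfl)
        (by intro t ht1 ht2
            rw [getD_set_self dp 0 _ h0]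
            rw [altFill_getD_ge _ _ _ _ _ (by omega)]
            exact hfresh t (by omega) ht2)]
      rw [getD_set_self dp 0 _ h0, List.set_set]
      congr 1
      rw [altFill_spec dprow i e v (by omega) (by omega)]
      by_cases hneg : row.getD i 0 = -1
      · -- wall at i: e = i, empty fill
        have hei : e = i := by rw [he, pvEnd, dif_pos hi, if_neg (not_not_intro hneg)]
        rw [hei]
        simp only [Nat.sub_self, List.replicate_zero, List.append_nil, List.nil_append]
        rw [List.take_append_drop]
        rw [specFrom_wall row none m i hi hneg]
        have htk : dprow.take (i+1) = dprow.take i ++ [(-1 : Int)] := by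
          rw [List.take_succ]
          have hi' : i < dprow.length := by omega
          rw [List.getElem?_eq_getElem hi']
          have : dprow[i] = -1 := by
            rw [← getD_lt dprow i 0 hi']
            exact hfresh i (le_refl i) hi
          rw [this]
          simp
        rw [htk]
        simp
      · -- run [i,e)
        have hlt := pvEnd_gt row m i hi hneg
        have hA : (dprow.take i).length = i := by simp; omega
        have hB : (List.replicate (e - i) v).length = e - i := by simp
        have htk : (dprow.take i ++ (List.replicate (e - i) v ++ dprow.drop e)).take (e+1)
            = dprow.take i ++ (List.replicate (e - i) v ++ (dprow.drop e).take (e + 1 - e)) := by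
          rw [take_append_ge _ _ _ (by rw [hA]; omega), hA]
          rw [take_append_ge _ _ _ (by rw [hB]; omega), hB]
          congr 3
          omega
        rw [List.append_assoc, htk]
        rw [specFrom_run row none m i hi hneg]
        have hok : runOk row none m i = true := by rw [runOk]; simp
        have hval : runVal row none m i = v := by
          rw [runVal, if_pos rfl, sSum, hv, he]
        rw [hok, ← he]
        simp only [if_pos rfl, if_true]
        rw [hval]
        by_cases hem : e < m
        · -- wall at e
          have hwe := pvEnd_stop row m i (by rw [← he] at *; omega)
          rw [← he] at hwe
          rw [← he] at *
          rw [specFrom_wall row none m e hem hwe]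
          have h1 : e + 1 - e = 1 := by omega
          rw [h1]
          have : (dprow.drop e).take 1 = [(-1 : Int)] := by
            have hd : e < dprow.length := by omega
            rw [List.drop_eq_getElem_cons hd, List.take_succ_cons, List.take_zero]
            have : dprow[e] = -1 := by
              rw [← getD_lt dprow e 0 hd]
              exact hfresh e (by omega) hem
            rw [this]
          rw [this]
          simp
        · -- e = m: done
          have hem' : e = m := by omega
          have hs1 : specFrom row none m e = [] := by
            rw [specFrom, dif_neg (by omega : ¬ e < m)]
          have hs2 : specFrom row none m (e+1) = [] := by
            rw [specFrom, dif_neg (by omega : ¬ e + 1 < m)]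
          rw [hs1, hs2]
          have : (dprow.drop e).take (e+1-e) = dprow.drop e := by
            apply List.take_of_length_le
            simp only [List.length_drop]
            omega
          have hde : dprow.drop e = [] := List.drop_eq_nil_of_le (by omega)
          rw [this, hde]
          simp
    · rw [if_neg hi]
      have hs : specFrom row none m i = [] := by rw [specFrom, dif_neg hi]
      rw [hs, List.append_nil]
      rw [List.take_of_length_le (by omega)]
      exact (set_getD_self dp 0 h0).symm

-- ---- A-side: one later row ----
theorem pvRowLoop_spec (row : List Int) (r m : Nat) (hm : m ≤ row.length) (hr : 1 ≤ r) :
    ∀ (fuel i : Nat) (dp : List (List Int)) (maxRow : Int), m - i < fuel → i ≤ m →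
      r < dp.length → -1 ≤ maxRow →
      m ≤ (dp.getD (r-1) []).length →
      (dp.getD r []).length = m →
      (∀ t, i ≤ t → t < m → (dp.getD r []).getD t 0 = -1) →
      pvRowLoop row r m fuel dp i maxRow
        = (max maxRow (specBest row (some (dp.getD (r-1) [])) m i),
           dp.set r ((dp.getD r []).take i ++ specFrom row (some (dp.getD (r-1) [])) m i)) := by
  intro fuel
  induction fuel with
  | zero => intro i dp maxRow hfu hi hrlen hmr hp hlen hfresh; omega
  | succ fuel ih =>
    intro i dp maxRow hfu hi hrlen hmr hp hlen hfresh
    set prevRow := dp.getD (r-1) [] with hprev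
    rw [pvRowLoop]
    by_cases hilt : i < m
    · rw [if_pos hilt]
      have hstep := pvStep_gt row dp r m i hm hp hilt
      rw [pvScan2_eq row dp r m hm hp (m+1) i 0 (-1) (by omega)] at hstep ⊢
      dsimp only at hstep ⊢
      set e := pvEnd row m i with he
      have hee := pvEnd_ge row m i
      have hel := pvEnd_le row m i hi
      set i2 := pvSkip row m (m+1) e with hi2
      have hi2e : e ≤ i2 := pvSkip_ge row m (m+1) e
      have hi2m : i2 ≤ m := pvSkip_le row m (m+1) e hel
      have hwall2 : ∀ t, e ≤ t → t < i2 → row.getD t 0 = -1 :=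
        fun t h1 h2 => pvSkip_wall row m (m+1) e t h1 h2
      have hcoins : ((row.drop i).take (e - i)).foldl (· + ·) 0 = sSum row i e := rfl
      have hmu : ((prevRow.drop i).take (e - i)).foldl max (-1) = pMax (some prevRow) i e := rfl
      rw [hcoins, hmu]
      set dprow := dp.getD r [] with hdprow
      by_cases hcond : pMax (some prevRow) i e = -1
      · -- not reachable from above: no fill, no best update
        rw [if_neg (not_not_intro hcond), if_neg (not_not_intro hcond)]
        rw [ih i2 dp maxRow (by omega) hi2m hrlen hmr hp hlen
          (fun t h1 h2 => hfresh t (by omega) h2)]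
        rw [← hprev, ← hdprow]
        have hokf : runOk row (some prevRow) m i = false := by
          rw [runOk, ← he]
          simp [hcond]
        rw [Prod.mk.injEq]
        constructor
        · -- best component
          congr 1
          rw [hi2, specBest_skip row (some prevRow) m (m+1) e]
          by_cases hneg : row.getD i 0 = -1
          · have hei : e = i := by rw [he, pvEnd, dif_pos hilt, if_neg (not_not_intro hneg)]
            rw [hei]
          · rw [specBest_run row (some prevRow) m i hilt hneg, ← he, hokf]
            simp
        · -- list component
          congr 1
          rw [take_extend dprow i i2 (by omega) (by omega)
            (fun t h1 h2 => hfresh t h1 (by omega))]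
          rw [List.append_assoc]
          congr 1
          by_cases hneg : row.getD i 0 = -1
          · have hei : e = i := by rw [he, pvEnd, dif_pos hilt, if_neg (not_not_intro hneg)]
            rw [hi2, hei, ← specFrom_skip row (some prevRow) m (m+1) i]
          · rw [specFrom_run row (some prevRow) m i hilt hneg, ← he, hokf]
            simp only [Bool.false_and, Bool.false_eq_true, if_false]
            rw [specFrom_skip row (some prevRow) m (m+1) e, ← hi2]
            rw [← List.append_assoc, ← List.replicate_add]
            congr 2
            omega
      · -- fill [i,e) with coins + mu, update best
        have hneg : row.getD i 0 ≠ -1 := by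
          intro hw
          have hei : e = i := by rw [he, pvEnd, dif_pos hilt, if_neg (not_not_intro hw)]
          apply hcond
          rw [hei, pMax, sMax]
          simp
        have hilte := pvEnd_gt row m i hilt hneg
        rw [if_pos hcond, if_pos hcond]
        set v : Int := sSum row i e + pMax (some prevRow) i e with hv
        rw [pvFill2_eq_set dp r i e v hrlen, ← hdprow]
        have hokt : runOk row (some prevRow) m i = true := by
          rw [runOk, ← he]
          simp [hcond]
        have hvalv : runVal row (some prevRow) m i = v := by
          rw [runVal, ← he, if_neg (by simp : ¬ (some prevRow : Option (List Int)) = none)]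
        have hfl : (altFill dprow i e v).length = m := by rw [altFill_length, hlen]
        rw [ih i2 _ (max maxRow v) (by omega) hi2m (by simpa using hrlen)
          (le_trans hmr (le_max_left _ _))
          (by rw [getD_set_ne dp r (r-1) _ (by omega)]; exact hp)
          (by rw [getD_set_self dp r _ hrlen]; exact hfl)
          (by intro t h1 h2
              rw [getD_set_self dp r _ hrlen]
              rw [altFill_getD_ge _ _ _ _ _ (by omega)]
              exact hfresh t (by omega) h2)]
        rw [getD_set_ne dp r (r-1) _ (by omega), ← hprev]
        rw [getD_set_self dp r _ hrlen, List.set_set]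
        rw [Prod.mk.injEq]
        constructor
        · -- best component
          rw [hi2, specBest_skip row (some prevRow) m (m+1) e]
          rw [specBest_run row (some prevRow) m i hilt hneg, ← he, hokt]
          have hcondt : (true && !decide ((some prevRow : Option (List Int)) = none)) = true := by
            simp
          rw [hcondt, if_pos rfl, hvalv, max_assoc]
        · -- list component
          congr 1
          rw [altFill_spec dprow i e v (by omega) (by omega)]
          have hA : (dprow.take i).length = i := by simp; omega
          have hB : (List.replicate (e - i) v).length = e - i := by simp
          have htk : (dprow.take i ++ (List.replicate (e - i) v ++ dprow.drop e)).take i2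
              = dprow.take i ++ (List.replicate (e - i) v ++ (dprow.drop e).take (i2 - e)) := by
            rw [take_append_ge _ _ _ (by rw [hA]; omega), hA]
            rw [take_append_ge _ _ _ (by rw [hB]; omega), hB]
            congr 3
            omega
          rw [List.append_assoc, htk]
          rw [drop_take_rep dprow e i2 (by omega) (by omega)
            (fun t h1 h2 => hfresh t (by omega) (by omega))]
          rw [specFrom_run row (some prevRow) m i hilt hneg, ← he, hokt]
          rw [if_pos rfl, hvalv]
          rw [specFrom_skip row (some prevRow) m (m+1) e, ← hi2]
          simp [List.append_assoc]
    · rw [if_neg hilt]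
      have hieq : i = m := by omega
      have hs : specFrom row (some prevRow) m i = [] := by rw [specFrom, dif_neg hilt]
      have hb : specBest row (some prevRow) m i = -1 := by rw [specBest, dif_neg hilt]
      rw [hs, hb, List.append_nil]
      rw [List.take_of_length_le (by omega)]
      rw [set_getD_self dp r hrlen]
      rw [max_eq_left hmr]

-- ---- B-side: the forward sweep computes fwdSpec pointwise ----
def fwdSpec (row : List Int) (prev : Option (List Int)) (j : Nat) : Int × Int :=
  if row.getD j 0 = -1 then (0, -1)
  else (sSum row (segStart row j) (j+1), pMax prev (segStart row j) (j+1))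

def fwdStep (row : List Int) (prev : Option (List Int))
    (st : List (Int × Int) × Int × Int) (j : Nat) : List (Int × Int) × Int × Int :=
  if row.getD j 0 = -1 then (st.1 ++ [((0 : Int), (-1 : Int))], 0, -1)
  else
    let s := st.2.1 + row.getD j 0
    let u := if prev = none then st.2.2 else max st.2.2 ((prev.getD []).getD j 0)
    (st.1 ++ [(s, u)], s, u)

theorem sweepFwd_def (row : List Int) (prev : Option (List Int)) (m : Nat) :
    sweepFwd row prev m = (List.range m).foldl (fwdStep row prev) ([], 0, -1) := rfl

theorem sSum_snoc (row : List Int) (a k : Nat) (ha : a ≤ k) (hk : k < row.length) :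
    sSum row a (k+1) = sSum row a k + row.getD k 0 := by
  rw [sSum, sSum]
  have h1 : k + 1 - a = (k - a) + 1 := by omega
  rw [h1, List.take_succ]
  have h2 : (row.drop a)[k - a]? = some row[k] := by
    rw [List.getElem?_drop]
    have : a + (k - a) = k := by omega
    rw [this]
    exact List.getElem?_eq_getElem hk
  rw [h2]
  rw [getD_lt row k 0 hk]
  simp

theorem sMax_snoc (p : List Int) (a k : Nat) (ha : a ≤ k) (hk : k < p.length) :
    sMax p a (k+1) = max (sMax p a k) (p.getD k 0) := by
  rw [sMax, sMax]
  have h1 : k + 1 - a = (k - a) + 1 := by omega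
  rw [h1, List.take_succ]
  have h2 : (p.drop a)[k - a]? = some p[k] := by
    rw [List.getElem?_drop]
    have : a + (k - a) = k := by omega
    rw [this]
    exact List.getElem?_eq_getElem hk
  rw [h2]
  rw [getD_lt p k 0 hk]
  simp

theorem sSum_single (row : List Int) (k : Nat) (hk : k < row.length) :
    sSum row k (k+1) = row.getD k 0 := by
  rw [sSum]
  have h1 : k + 1 - k = 1 := by omega
  rw [h1, List.drop_eq_getElem_cons hk, List.take_succ_cons, List.take_zero]
  rw [getD_lt row k 0 hk]
  simp

theorem sMax_single (p : List Int) (k : Nat) (hk : k < p.length) :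
    sMax p k (k+1) = max (-1) (p.getD k 0) := by
  rw [sMax]
  have h1 : k + 1 - k = 1 := by omega
  rw [h1, List.drop_eq_getElem_cons hk, List.take_succ_cons, List.take_zero]
  rw [getD_lt p k 0 hk]
  simp

def fwdState (row : List Int) (prev : Option (List Int)) (k : Nat) : Int × Int :=
  match k with
  | 0 => (0, -1)
  | j+1 => fwdSpec row prev j

theorem fwdState1 (row : List Int) (prev : Option (List Int)) (k : Nat)
    (hkl : k < row.length) (hw : ¬ row.getD k 0 = -1) :
    sSum row (segStart row k) (k+1) = (fwdState row prev k).1 + row.getD k 0 := by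
  cases k with
  | zero =>
    have hss : segStart row 0 = 0 := rfl
    rw [hss, sSum_single row 0 hkl, fwdState]
    simp
  | succ j =>
    rw [fwdState, fwdSpec]
    by_cases hwj : row.getD j 0 = -1
    · rw [if_pos hwj]
      have hss : segStart row (j+1) = j+1 := by rw [segStart, if_pos hwj]
      rw [hss, sSum_single row (j+1) hkl]
      simp
    · rw [if_neg hwj]
      have hss : segStart row (j+1) = segStart row j := by rw [segStart, if_neg hwj]
      have hsl := segStart_le row j
      rw [hss, sSum_snoc row (segStart row j) (j+1) (by omega) hkl]

theorem fwdState2_none (row : List Int) (k : Nat) :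
    (fwdState row none k).2 = -1 := by
  cases k with
  | zero => rfl
  | succ j =>
    rw [fwdState, fwdSpec]
    split_ifs <;> simp [pMax]

theorem fwdState2_some (row p : List Int) (k : Nat)
    (hkp : k < p.length) (hw : ¬ row.getD k 0 = -1) :
    pMax (some p) (segStart row k) (k+1) = max (fwdState row (some p) k).2 (p.getD k 0) := by
  cases k with
  | zero =>
    have hss : segStart row 0 = 0 := rfl
    rw [hss, pMax, sMax_single p 0 hkp, fwdState]
  | succ j =>
    rw [fwdState, fwdSpec]
    by_cases hwj : row.getD j 0 = -1
    · rw [if_pos hwj]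
      have hss : segStart row (j+1) = j+1 := by rw [segStart, if_pos hwj]
      rw [hss, pMax, sMax_single p (j+1) hkp]
    · rw [if_neg hwj]
      have hss : segStart row (j+1) = segStart row j := by rw [segStart, if_neg hwj]
      have hsl := segStart_le row j
      rw [hss, pMax, pMax, sMax_snoc p (segStart row j) (j+1) (by omega) hkp]

theorem fwd_eq (row : List Int) (prev : Option (List Int)) (m : Nat)
    (hm : m ≤ row.length) (hp : ∀ p, prev = some p → m ≤ p.length) :
    ∀ k, k ≤ m → (List.range k).foldl (fwdStep row prev) ([], 0, -1)
      = ((List.range k).map (fwdSpec row prev), fwdState row prev k) := by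
  intro k
  induction k with
  | zero => intro h; simp [fwdState]
  | succ k ih =>
    intro h
    rw [List.range_succ, List.foldl_append, List.foldl_cons, List.foldl_nil]
    rw [ih (by omega), List.map_append]
    have hkl : k < row.length := by omega
    have h2 : fwdState row prev (k+1) = fwdSpec row prev k := rfl
    by_cases hw : row.getD k 0 = -1
    · have h3 : fwdSpec row prev k = (0, -1) := by rw [fwdSpec, if_pos hw]
      simp only [fwdStep]
      rw [if_pos hw, h2]
      simp [h3]
    · rcases prev with _ | p
      · have hval : fwdSpec row none k
            = ((fwdState row none k).1 + row.getD k 0, (fwdState row none k).2) := by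
          rw [fwdSpec, if_neg hw]
          rw [Prod.mk.injEq]
          exact ⟨fwdState1 row none k hkl hw, (fwdState2_none row k).symm ▸ rfl⟩
        simp only [fwdStep]
        rw [if_neg hw, h2]
        simp [hval]
      · have hkp : k < p.length := by have := hp p rfl; omega
        have hval : fwdSpec row (some p) k
            = ((fwdState row (some p) k).1 + row.getD k 0,
               max (fwdState row (some p) k).2 (p.getD k 0)) := by
          rw [fwdSpec, if_neg hw]
          rw [Prod.mk.injEq]
          exact ⟨fwdState1 row (some p) k hkl hw, fwdState2_some row p k hkp hw⟩
        simp only [fwdStep]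
        rw [if_neg hw, h2]
        simp [hval]

theorem fwd_getD (row : List Int) (prev : Option (List Int)) (m j : Nat)
    (hm : m ≤ row.length) (hp : ∀ p, prev = some p → m ≤ p.length) (hj : j < m) :
    (sweepFwd row prev m).1.getD j (0, -1) = fwdSpec row prev j := by
  rw [sweepFwd_def, fwd_eq row prev m hm hp m (le_refl m)]
  dsimp only
  have h1 : j < ((List.range m).map (fwdSpec row prev)).length := by simp [hj]
  rw [getD_lt _ _ _ h1]
  simp [hj]

-- ---- B-side: the backward sweep ----
def bStep (row : List Int) (prev : Option (List Int)) (fwd : List (Int × Int)) (m : Nat)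
    (st : List Int × Int × Bool × Int) (j : Nat) : List Int × Int × Bool × Int :=
  if row.getD j 0 = -1 then (st.1 ++ [(-1 : Int)], st.2)
  else
    let st2 :=
      if j = m - 1 ∨ row.getD (j+1) 0 = -1 then
        let su := fwd.getD j (0, -1)
        let ok := decide (prev = none) || decide (su.2 ≠ -1)
        let val := if prev = none then su.1 else su.1 + su.2
        ((if ok && !decide (prev = none) then max st.2.1 val else st.2.1), ok, val)
      else st.2
    (st.1 ++ [if st2.2.1 then st2.2.2 else -1], st2)

theorem sweepBack_def (row : List Int) (prev : Option (List Int)) (fwd : List (Int × Int))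
    (m : Nat) :
    sweepBack row prev fwd m
      = ((List.range m).reverse).foldl (bStep row prev fwd m) ([], -1, false, 0) := rfl

theorem segStart_run (row : List Int) (i : Nat) (hi : i = 0 ∨ row.getD (i-1) 0 = -1) :
    ∀ d, (∀ t, i ≤ t → t ≤ i + d → row.getD t 0 ≠ -1) → segStart row (i + d) = i := by
  intro d
  induction d with
  | zero =>
    intro hrun
    cases i with
    | zero => rfl
    | succ j =>
      rw [segStart]
      rcases hi with h | h
      · omega
      · rw [if_pos (show row.getD j 0 = -1 from h)]
  | succ d ih =>
    intro hrun
    have h1 : i + (d+1) = (i + d) + 1 := by omega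
    rw [h1, segStart]
    rw [if_neg (hrun (i+d) (by omega) (by omega))]
    exact ih (fun t h1 h2 => hrun t h1 (by omega))

-- constant block of the backward sweep: nonwall non-run-end indices only append
theorem bStep_const (row : List Int) (prev : Option (List Int)) (fwd : List (Int × Int))
    (m : Nat) :
    ∀ (l : List Nat) (acc : List Int) (s : Int × Bool × Int),
      (∀ j ∈ l, row.getD j 0 ≠ -1 ∧ j ≠ m - 1 ∧ row.getD (j+1) 0 ≠ -1) →
      l.foldl (bStep row prev fwd m) (acc, s)
        = (acc ++ List.replicate l.length (if s.2.1 then s.2.2 else -1), s) := by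
  intro l
  induction l with
  | nil => intro acc s h; simp
  | cons j l ih =>
    intro acc s h
    obtain ⟨h1, h2, h3⟩ := h j (by simp)
    rw [List.foldl_cons]
    simp only [bStep]
    rw [if_neg h1]
    rw [if_neg (show ¬(j = m - 1 ∨ row.getD (j+1) 0 = -1) from not_or.mpr ⟨h2, h3⟩)]
    rw [ih _ s (fun x hx => h x (by simp [hx]))]
    simp [List.replicate_succ]

theorem back_spec (row : List Int) (prev : Option (List Int)) (m : Nat)
    (hm : m ≤ row.length) (hp : ∀ p, prev = some p → m ≤ p.length) :
    ∀ (k i : Nat), m - i ≤ k → i ≤ m →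
      (i = 0 ∨ i = m ∨ row.getD (i-1) 0 = -1 ∨ row.getD i 0 = -1) →
      ∀ (acc : List Int) (b : Int) (ov : Bool × Int), -1 ≤ b →
      ∃ z, ((List.range' i (m - i)).reverse).foldl
            (bStep row prev (sweepFwd row prev m).1 m) (acc, b, ov)
        = (acc ++ (specFrom row prev m i).reverse, max b (specBest row prev m i), z) := by
  intro k
  induction k with
  | zero =>
    intro i hk hi halign acc b ov hb
    have : i = m := by omega
    subst this
    refine ⟨ov, ?_⟩
    rw [Nat.sub_self]
    rw [specFrom, dif_neg (by omega), specBest, dif_neg (by omega)]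
    simp [max_eq_left hb]
  | succ k ih =>
    intro i hk hi halign acc b ov hb
    by_cases him : i < m
    · by_cases hw : row.getD i 0 = -1
      · -- wall at i
        have h1 : m - i = (m - (i+1)) + 1 := by omega
        rw [h1, List.range'_succ, List.reverse_cons, List.foldl_append]
        obtain ⟨z, hz⟩ := ih (i+1) (by omega) (by omega) (by right; right; left; simpa) acc b ov hb
        rw [hz, List.foldl_cons, List.foldl_nil]
        simp only [bStep]
        rw [if_pos hw]
        refine ⟨z, ?_⟩
        rw [specFrom_wall row prev m i him hw, specBest_wall row prev m i him hw]
        simp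
      · -- run [i, e)
        have hal : i = 0 ∨ row.getD (i-1) 0 = -1 := by
          rcases halign with h | h | h | h
          · left; exact h
          · omega
          · right; exact h
          · exact absurd h hw
        set e := pvEnd row m i with he
        have hee := pvEnd_gt row m i him hw
        have hel := pvEnd_le row m i hi
        have hrun : ∀ t, i ≤ t → t < e → row.getD t 0 ≠ -1 :=
          fun t h1 h2 => pvEnd_nonwall row m i t h1 h2
        -- split range' i (m-i) = range' i (e-1-i) ++ [e-1] ++ range' e (m-e)
        have hsplit : List.range' i (m - i)
            = (List.range' i (e-1-i) ++ [e-1]) ++ List.range' e (m - e) := by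
          have h2 : List.range' i (e-1-i) ++ List.range' (i + 1*(e-1-i)) 1
              = List.range' i ((e-1-i) + 1) := List.range'_append
          have h3 : i + 1*(e-1-i) = e-1 := by omega
          rw [h3] at h2
          have h4 : List.range' (e-1) 1 = [e-1] := by simp
          rw [h4] at h2
          rw [h2]
          have h5 : List.range' i ((e-1-i)+1) ++ List.range' (i + 1*((e-1-i)+1)) (m-e)
              = List.range' i (((e-1-i)+1) + (m-e)) := List.range'_append
          have h6 : i + 1*((e-1-i)+1) = e := by omega
          rw [h6] at h5
          rw [h5]
          congr 1
          omega
        rw [hsplit, List.reverse_append, List.foldl_append]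
        -- far part [e, m) first (it is at the head of the reversed list)
        obtain ⟨z1, hz1⟩ := ih e (by omega) (by omega)
          (by by_cases hem : e = m
              · right; left; exact hem
              · right; right; right
                exact pvEnd_stop row m i (by omega)) acc b ov hb
        rw [hz1]
        -- then the run end e-1
        rw [List.reverse_append, List.foldl_append]
        rw [List.reverse_singleton, List.foldl_cons, List.foldl_nil]
        simp only [bStep]
        rw [if_neg (hrun (e-1) (by omega) (by omega))]
        have hcondE : (e-1 = m - 1 ∨ row.getD (e-1+1) 0 = -1) := by
          by_cases hem : e = m
          · left; omega
          · right
            have h7 : e - 1 + 1 = e := by omega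
            rw [h7]
            exact pvEnd_stop row m i (by omega)
        rw [if_pos hcondE]
        have hfw : (sweepFwd row prev m).1.getD (e-1) (0, -1)
            = (sSum row i e, pMax prev i e) := by
          rw [fwd_getD row prev m (e-1) hm hp (by omega)]
          rw [fwdSpec, if_neg (hrun (e-1) (by omega) (by omega))]
          have hseg : segStart row (e-1) = i := by
            have := segStart_run row i hal (e-1-i)
              (fun t h1 h2 => hrun t h1 (by omega))
            have h8 : i + (e-1-i) = e-1 := by omega
            rw [h8] at this
            exact this
          rw [hseg]
          have h9 : e - 1 + 1 = e := by omega
          rw [h9]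
        rw [hfw]
        dsimp only
        have hok : (decide (prev = none) || decide (pMax prev i e ≠ -1)) = runOk row prev m i := by
          rw [runOk, ← he]
        have hval : (if prev = none then sSum row i e else sSum row i e + pMax prev i e)
            = runVal row prev m i := by
          rw [runVal, ← he]
        rw [hok, hval]
        -- then the constant block [i, e-1)
        rw [bStep_const row prev _ m (List.range' i (e-1-i)).reverse _ _
          (by intro j hj
              rw [List.mem_reverse, List.mem_range'] at hj
              refine ⟨hrun j (by omega) (by omega), by omega, hrun (j+1) (by omega) (by omega)⟩)]
        dsimp only
        refine ⟨(runOk row prev m i, runVal row prev m i), ?_⟩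
        rw [Prod.mk.injEq, Prod.mk.injEq]
        refine ⟨?_, ?_, rfl⟩
        · -- list component
          rw [specFrom_run row prev m i him hw, ← he]
          rw [List.reverse_append, List.reverse_replicate]
          simp only [List.length_reverse, List.length_range']
          rw [List.append_assoc, List.append_assoc]
          congr 1
          congr 1
          have h10 : e - i = (e-1-i) + 1 := by omega
          rw [h10, List.replicate_succ]
          simp
        · -- best component
          rw [specBest_run row prev m i him hw, ← he]
          by_cases hcb : (runOk row prev m i && !decide (prev = none)) = true
          · rw [if_pos hcb, if_pos hcb]
            rw [max_assoc]
            congr 1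
            exact max_comm _ _
          · rw [if_neg hcb, if_neg hcb]
    · have : i = m := by omega
      subst this
      refine ⟨ov, ?_⟩
      rw [Nat.sub_self]
      rw [specFrom, dif_neg (by omega), specBest, dif_neg (by omega)]
      simp [max_eq_left hb]

theorem sweep_eq (row : List Int) (prev : Option (List Int)) (m : Nat)
    (hm : m ≤ row.length) (hp : ∀ p, prev = some p → m ≤ p.length) :
    sweep row prev m = (specFrom row prev m 0, specBest row prev m 0) := by
  obtain ⟨z, hz⟩ := back_spec row prev m hm hp m 0 (by omega) (by omega) (by left; rfl)
    [] (-1) (false, 0) (le_refl _)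
  rw [sweep, sweepBack_def]
  rw [List.range_eq_range']
  simp only [Nat.sub_zero] at hz
  rw [hz]
  dsimp only
  rw [List.nil_append, List.reverse_reverse]
  rw [max_eq_right (specBest_ge row prev m 0)]

-- ---- outer loop ----
theorem pvOuter_spec (grid : List (List Int)) (m n : Nat) (hn : n = grid.length)
    (hrows : ∀ row ∈ grid, m ≤ row.length) :
    ∀ (k r : Nat) (dp : List (List Int)) (b0 : Int), 1 ≤ r → r + 1 ≤ n → n - r ≤ k →
      dp.length = n → (dp.getD (r-1) []).length = m →
      (∀ r', r ≤ r' → r' < n → dp.getD r' [] = List.replicate m (-1)) →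
      pvOuter grid m n (List.range' r (n - r)) dp
        = ((List.range' r (n - r)).foldl
            (fun (st : List Int × Int) q => sweep (grid.getD q []) (some st.1) m)
            (dp.getD (r-1) [], b0)).2 := by
  intro k
  induction k with
  | zero => intro r dp b0 hr hrn hk; omega
  | succ k ih =>
    intro r dp b0 hr hrn hk hdlen hplen hfresh
    have hrn' : r < n := by omega
    have hrg : r < grid.length := by omega
    have hmem : grid.getD r [] ∈ grid := by
      rw [getD_lt _ _ _ hrg]; exact List.getElem_mem hrg
    have hrowr : m ≤ (grid.getD r []).length := hrows _ hmem
    have hsplit : n - r = (n - (r+1)) + 1 := by omega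
    rw [hsplit, List.range'_succ, pvOuter]
    set row := grid.getD r [] with hrowdef
    set prevRow := dp.getD (r-1) [] with hprevdef
    have hfr : dp.getD r [] = List.replicate m (-1) := hfresh r (le_refl r) hrn'
    rw [pvRowLoop_spec row r m hrowr hr (m+1) 0 dp (-1) (by omega) (by omega)
      (by omega) (le_refl _) (by rw [← hprevdef]; omega)
      (by rw [hfr]; simp)
      (by intro t h1 h2; rw [hfr]; exact getD_replicate m t (-1) 0 h2)]
    rw [← hprevdef]
    have hsw : sweep row (some prevRow) m = (specFrom row (some prevRow) m 0,
        specBest row (some prevRow) m 0) := by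
      apply sweep_eq row (some prevRow) m hrowr
      intro p hpe
      cases hpe
      omega
    have htake0 : (dp.getD r []).take 0 = [] := by simp
    by_cases hlast : r = n - 1
    · rw [if_pos hlast]
      have h1 : n - (r+1) = 0 := by omega
      rw [h1]
      rw [show List.range' (r+1) 0 = ([] : List Nat) from rfl]
      rw [List.foldl_cons, List.foldl_nil, hsw]
      dsimp only
      exact max_eq_right (specBest_ge row (some prevRow) m 0)
    · rw [if_neg hlast]
      dsimp only
      set dp' := dp.set r ((dp.getD r []).take 0 ++ specFrom row (some prevRow) m 0) with hdp'
      have hdp'r : dp'.getD r [] = specFrom row (some prevRow) m 0 := by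
        rw [hdp', getD_set_self dp r _ (by omega)]
        rw [htake0, List.nil_append]
      rw [ih (r+1) dp' (specBest row (some prevRow) m 0) (by omega) (by omega) (by omega)
        (by rw [hdp']; simpa using hdlen)
        (by simp only [Nat.add_sub_cancel]
            rw [hdp'r, specFrom_length]
            omega)
        (by intro r' h1 h2
            rw [hdp', getD_set_ne dp r r' _ (by omega)]
            exact hfresh r' (by omega) h2)]
      simp only [Nat.add_sub_cancel]
      rw [hdp'r]
      rw [List.foldl_cons, hsw]

-- ===== VERDICT (by name: the statement is the Claim_ definition above) =====
theorem plumber_spec : Claim_equal_plumber := by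
  unfold Claim_equal_plumber
  intro grid _hdom hpre
  obtain ⟨hn2, hrows⟩ := hpre
  unfold Spec_plumber
  set m := (grid.getD 0 []).length with hmdef
  set n := grid.length with hndef
  set row0 := grid.getD 0 [] with hrow0
  rw [plumber]
  set dp0 := List.replicate n (List.replicate m (-1 : Int)) with hdp0
  have hdp0len : dp0.length = n := by simp [hdp0]
  have hrow0len : m ≤ row0.length := le_refl _
  rw [pvRow0_spec row0 m hrow0len (m+1) 0 dp0 (by omega) (by omega)
    (by rw [hdp0, getD_replicate n 0 _ _ (by omega)]; simp)
    (by intro t h1 h2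
        rw [hdp0, getD_replicate n 0 _ _ (by omega)]
        exact getD_replicate m t (-1) 0 h2)]
  have htake0 : (dp0.getD 0 []).take 0 = [] := by simp
  rw [htake0, List.nil_append]
  set dp1 := dp0.set 0 (specFrom row0 none m 0) with hdp1
  have hdp1r0 : dp1.getD 0 [] = specFrom row0 none m 0 := by
    rw [hdp1, getD_set_self dp0 0 _ (by omega)]
  rw [pvOuter_spec grid m n rfl hrows n 1 dp1 0 (le_refl 1) (by omega) (by omega)
    (by rw [hdp1]; simpa using hdp0len)
    (by simp only [Nat.sub_self]
        rw [hdp1r0, specFrom_length]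
        omega)
    (by intro r' h1 h2
        rw [hdp1, getD_set_ne dp0 0 r' _ (by omega), hdp0]
        exact getD_replicate n r' _ _ h2)]
  simp only [Nat.sub_self]
  rw [hdp1r0]
  rw [plumber_alt]
  have hsw0 : (sweep row0 none m).1 = specFrom row0 none m 0 := by
    rw [sweep_eq row0 none m hrow0len (by intro p h; cases h)]
  rw [← hndef, ← hmdef, ← hrow0, hsw0]
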